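-- pv_equiv track=rewrite | github.com/EsriJapan/3D-CityModel-ConversionTools-for-ArcGIS | Tools/script/calculate_genericAttributeSet_field_v110.py | fieldChecker
-- ===== SOURCE A (Python) =====
-- def fieldChecker(names):
--     '''
--     同じname がある場合に2つ目以降は "name_x" のフィールドにして重複しない形式で返却（x=2から付番されます）
--     '''
--     new_names = []
--     count_dict={}
--     for name in names:
--         count_dict[name] = count_dict.get(name,0) + 1
--         if count_dict[name] == 1:
--             new_names.append(name)
--         else:
--             new_name = name + "_{0}".format(count_dict.get(name,0))
--             new_names.append(new_name)
--     return new_names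
-- ===== SOURCE B (Python) =====
-- def fieldChecker(names):
--     # Group-and-scatter: first group all indices by name, then write each
--     # group's members (suffixed by their 1-based rank) back into an output
--     # array by position.
--     positions = {}
--     for i, name in enumerate(names):
--         positions.setdefault(name, []).append(i)
--     out = [None] * len(names)
--     for name, idxs in positions.items():
--         for k, i in enumerate(idxs, 1):
--             out[i] = name if k == 1 else name + "_{0}".format(k)
--     return out
-- ===== Notes on version B (the rewrite author's own statement) =====
-- stated objective: alternative
-- what changed: Replaces A's single left-to-right pass with a running counter by a group-and-scatter algorithm: one pass builds a name -> list-of-indices grouping, then a second phase walks each group and writes the rank-suffixed name back into a preallocated output array by index.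
import Mathlib
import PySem

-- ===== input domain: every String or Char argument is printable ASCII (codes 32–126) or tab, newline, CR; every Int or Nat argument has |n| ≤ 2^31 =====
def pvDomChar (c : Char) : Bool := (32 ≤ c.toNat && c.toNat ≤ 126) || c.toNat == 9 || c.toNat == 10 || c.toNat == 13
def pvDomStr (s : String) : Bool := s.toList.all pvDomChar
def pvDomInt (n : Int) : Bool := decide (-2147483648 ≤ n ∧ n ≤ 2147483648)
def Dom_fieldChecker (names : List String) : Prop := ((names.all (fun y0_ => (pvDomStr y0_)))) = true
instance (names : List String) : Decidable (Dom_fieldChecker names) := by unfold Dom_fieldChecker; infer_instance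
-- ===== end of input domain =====

-- B replaces A's single counting pass by a group-and-scatter scheme: group indices by
-- name, then write each group's rank-suffixed names back by position (alternative, not faster).

-- ===== PORT A =====
-- loop state: (new_names, count_dict)
def fieldCheckerStep (st : List String × PySem.Dict String Int) (name : String) :
    List String × PySem.Dict String Int :=
  let d := st.2.insert name (st.2.getD name 0 + 1)
  if d.getD name 0 == 1 then (st.1 ++ [name], d)
  else (st.1 ++ [name ++ "_" ++ PySem.Int.toStr (d.getD name 0)], d)

def fieldChecker (names : List String) : List String :=
  (names.foldl fieldCheckerStep ([], PySem.Dict.empty)).1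

-- ===== PORT B =====
-- phase 1: positions = {name: list of its indices}; phase 2: scatter the rank-suffixed
-- names into the preallocated array `out` ([None]*len(names) is the List (Option String)
-- of `none`s; the final `.map (·.getD "")` is the type adjustment for Python's returned
-- list of strings — every slot has been written, as the proof below shows).
def fieldChecker_alt (names : List String) : List String :=
  let positions := (PySem.List.enumerate names 0).foldl
      (fun d p => d.modify p.2 ([] : List Int) (fun l => l ++ [p.1])) PySem.Dict.empty
  let out := positions.items.foldl
      (fun o pr => (PySem.List.enumerate pr.2 1).foldl
          (fun o q => PySem.List.pySetD o q.2
              (some (if q.1 == 1 then pr.1 else pr.1 ++ "_" ++ PySem.Int.toStr q.1))) o)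
      (List.replicate names.length (none : Option String))
  out.map (fun o => o.getD "")

-- ===== PRECONDITION & SPEC =====
def Spec_fieldChecker (names : List String) (out : List String) : Prop := out = fieldChecker_alt names
instance (names : List String) (out : List String) : Decidable (Spec_fieldChecker names out) := by unfold Spec_fieldChecker; infer_instance

-- ===== CLAIM (what is proved, stated in full; the proofs are below) =====
def Claim_equal_fieldChecker : Prop := ∀ (names : List String), Dom_fieldChecker names → Spec_fieldChecker names (fieldChecker names)

-- ===== LEMMAS AND PROOFS =====

def expOut (names : List String) (j : Nat) : String :=
  if (names.take (j+1)).count (names.getD j "") == 1 then names.getD j ""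
  else names.getD j "" ++ "_" ++ PySem.Int.toStr (((names.take (j+1)).count (names.getD j "") : Nat) : Int)

-- ---- A-side characterisation: A's output at index j is expOut names j ----

def fcDict (pre : List String) : PySem.Dict String Int :=
  pre.foldl (fun d x => d.insert x (d.getD x 0 + 1)) PySem.Dict.empty

lemma fcDict_getD (pre : List String) (v : String) :
    (fcDict pre).getD v 0 = (pre.count v : Int) := by
  simp [fcDict, PySem.Dict.getD_foldl_insert_add_one]

lemma fcA_invariant (rest pre acc : List String) :
    (rest.foldl fieldCheckerStep (acc, fcDict pre)).1 =
      acc ++ (List.range rest.length).map (fun k => expOut (pre ++ rest) (pre.length + k)) := by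
  induction rest generalizing pre acc with
  | nil => simp
  | cons x rest ih =>
    have hd : (fcDict pre).insert x ((fcDict pre).getD x 0 + 1) = fcDict (pre ++ [x]) := by
      simp [fcDict]
    have hcnt : ((fcDict pre).insert x ((fcDict pre).getD x 0 + 1)).getD x 0
        = ((pre.count x + 1 : Nat) : Int) := by
      rw [hd, fcDict_getD]
      simp [List.count_append]
    have hget : (pre ++ x :: rest).getD pre.length "" = x := by
      rw [List.getD_eq_getElem?_getD, List.getElem?_append_right (le_refl _)]
      simp
    have htake : (pre ++ x :: rest).take (pre.length + 1) = pre ++ [x] := by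
      rw [show pre ++ x :: rest = (pre ++ [x]) ++ rest by simp,
        List.take_append_of_le_length (by simp)]
      simp
    have hexp : expOut (pre ++ x :: rest) (pre.length + 0) = (if ((pre.count x + 1 : Nat) : Int) == 1
        then x else x ++ "_" ++ PySem.Int.toStr ((pre.count x + 1 : Nat) : Int)) := by
      unfold expOut
      rw [Nat.add_zero, hget, htake]
      have hc : (pre ++ [x]).count x = pre.count x + 1 := by simp [List.count_append]
      rw [hc]
      by_cases h0 : pre.count x = 0
      · simp [h0]
      · have b1 : ((pre.count x + 1 : Nat) == 1) = false := by
          simpa using (by omega : ¬ pre.count x + 1 = 1)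
        have b2 : (((pre.count x + 1 : Nat) : Int) == 1) = false := by
          simpa using (by push_cast; omega : ¬ ((pre.count x + 1 : Nat) : Int) = 1)
        rw [b1, b2]
    have hst : fieldCheckerStep (acc, fcDict pre) x
        = (acc ++ [expOut (pre ++ x :: rest) (pre.length + 0)], fcDict (pre ++ [x])) := by
      have hcnt2 : (fcDict (pre ++ [x])).getD x 0 = ((pre.count x + 1 : Nat) : Int) := by
        rw [fcDict_getD]; simp [List.count_append]
      unfold fieldCheckerStep
      simp only [hd, hcnt2, hexp]
      by_cases hb : (((pre.count x + 1 : Nat) : Int) == 1) = true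
      · rw [if_pos hb, if_pos hb]
      · rw [if_neg hb, if_neg hb]
    rw [List.foldl_cons, hst, ih (pre ++ [x])]
    rw [List.length_cons, List.range_succ_eq_map, List.map_cons, List.map_map]
    simp only [List.append_assoc, List.singleton_append, List.length_append, List.length_cons,
      List.length_nil]
    congr 1
    congr 1
    apply List.map_congr_left
    intro k _
    simp only [Function.comp_apply]
    congr 1
    omega

lemma fieldChecker_eq_map (names : List String) :
    fieldChecker names = (List.range names.length).map (expOut names) := by
  have h := fcA_invariant names [] []
  simpa [fieldChecker, fcDict] using h

-- ---- B-side: positions of a name in the list ----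

def idxsNat : List String → String → List Nat
  | [], _ => []
  | x :: xs, c => (if x = c then [0] else []) ++ (idxsNat xs c).map (· + 1)

lemma idxsNat_core (xs : List String) (c : String) (k j : Nat)
    (h : (idxsNat xs c)[k]? = some j) :
    j < xs.length ∧ xs.getD j "" = c ∧ (xs.take (j+1)).count c = k + 1 := by
  induction xs generalizing k j with
  | nil => simp [idxsNat] at h
  | cons x xs ih =>
    by_cases hx : x = c
    · subst hx
      cases k with
      | zero =>
        simp [idxsNat] at h
        subst h
        simp
      | succ k =>
        simp only [idxsNat, if_true, List.singleton_append,
          List.getElem?_cons_succ, List.getElem?_map] at h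
        cases hj : (idxsNat xs x)[k]? with
        | none => simp [hj] at h
        | some j' =>
          rw [hj] at h
          simp at h
          obtain ⟨h1, h2, h3⟩ := ih k j' hj
          subst h
          refine ⟨by simpa using h1, by simpa using h2, ?_⟩
          simp [h3]
    · simp only [idxsNat, if_neg hx, List.nil_append, List.getElem?_map] at h
      cases hj : (idxsNat xs c)[k]? with
      | none => simp [hj] at h
      | some j' =>
        rw [hj] at h
        simp at h
        obtain ⟨h1, h2, h3⟩ := ih k j' hj
        subst h
        refine ⟨by simpa using h1, by simpa using h2, ?_⟩
        simp [h3, hx]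

lemma mem_idxsNat_self (xs : List String) (j : Nat) (hj : j < xs.length) :
    j ∈ idxsNat xs (xs.getD j "") := by
  induction xs generalizing j with
  | nil => simp at hj
  | cons x xs ih =>
    cases j with
    | zero => simp [idxsNat]
    | succ j =>
      simp only [List.length_cons, Nat.succ_lt_succ_iff] at hj
      have := ih j hj
      simp only [idxsNat, List.getD_cons_succ, List.mem_append, List.mem_map]
      right
      exact ⟨j, this, rfl⟩

lemma enumerate_filter_map (xs : List String) (c : String) (s : Int) :
    ((PySem.List.enumerate xs s).filter (fun p => p.2 == c)).map (fun p => p.1)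
      = (idxsNat xs c).map (fun (j : Nat) => s + (j : Int)) := by
  induction xs generalizing s with
  | nil => simp [PySem.List.enumerate_nil, idxsNat]
  | cons x xs ih =>
    rw [PySem.List.enumerate_cons]
    by_cases hx : x = c
    · subst hx
      rw [List.filter_cons_of_pos (by simp)]
      have hd : idxsNat (x :: xs) x = 0 :: (idxsNat xs x).map (· + 1) := by simp [idxsNat]
      rw [hd]
      simp only [List.map_cons, List.map_map]
      rw [ih]
      congr 1
      · simp
      · apply List.map_congr_left
        intro j _
        simp only [Function.comp_apply]
        push_cast
        ring
    · rw [List.filter_cons_of_neg (by simp [hx])]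
      have hd : idxsNat (x :: xs) c = (idxsNat xs c).map (· + 1) := by simp [idxsNat, hx]
      rw [hd, List.map_map, ih]
      apply List.map_congr_left
      intro j _
      simp [Function.comp]
      ring

-- ---- B-side: the positions dict groups exactly these indices ----

def bPositions (names : List String) : PySem.Dict String (List Int) :=
  (PySem.List.enumerate names 0).foldl
    (fun d p => d.modify p.2 ([] : List Int) (fun l => l ++ [p.1])) PySem.Dict.empty

lemma bPositions_eq_swap (names : List String) :
    bPositions names = ((PySem.List.enumerate names 0).map Prod.swap).foldl
      (fun d p => d.modify p.1 ([] : List Int) (fun l => l ++ [p.2])) PySem.Dict.empty := by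
  rw [List.foldl_map]
  rfl

lemma bPositions_getD (names : List String) (c : String) :
    (bPositions names).getD c [] = (idxsNat names c).map (fun (j : Nat) => (j : Int)) := by
  rw [bPositions_eq_swap, PySem.Dict.getD_foldl_modify_append, PySem.Dict.getD_empty,
    List.nil_append, List.filter_map, List.map_map]
  have : ((fun p => p.1 == c) ∘ (Prod.swap : Int × String → String × Int)) = (fun p => p.2 == c) := by
    funext p; rfl
  rw [this]
  have h2 : ((fun (p : String × Int) => p.2) ∘ (Prod.swap : Int × String → String × Int)) = (fun p => p.1) := by
    funext p; rfl
  rw [h2, enumerate_filter_map]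
  simp

lemma bPositions_keys_nodup (names : List String) : (bPositions names).keys.Nodup := by
  unfold bPositions
  exact PySem.Dict.nodup_keys_foldl_modify_key (PySem.List.enumerate names 0)
    (fun (p : Int × String) => p.2) ([] : List Int)
    (fun _ (p : Int × String) => fun l => l ++ [p.1]) PySem.Dict.empty
    (by simp [PySem.Dict.keys_empty])

lemma bPositions_mem_keys (names : List String) (c : String) (hc : c ∈ names) :
    c ∈ (bPositions names).keys := by
  unfold bPositions
  rw [PySem.Dict.keys_foldl_modify_key (PySem.List.enumerate names 0)
    (fun (p : Int × String) => p.2) ([] : List Int)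
    (fun _ (p : Int × String) => fun l => l ++ [p.1]) PySem.Dict.empty,
    PySem.List.map_snd_enumerate, PySem.Dict.keys_empty, PySem.Set.update_nil_left]
  exact (PySem.Set.mem_ofList names c).mpr hc

lemma bPositions_mem_items (names : List String) (c : String) (hc : c ∈ names) :
    (c, (idxsNat names c).map (fun (j : Nat) => (j : Int))) ∈ (bPositions names).items := by
  have hk := bPositions_mem_keys names c hc
  have hnd := bPositions_keys_nodup names
  have hg : (bPositions names).get? c = some ((bPositions names).getD c []) := by
    cases hq : (bPositions names).get? c with
    | none =>
      exact absurd (((PySem.Dict.get?_eq_none_iff_not_mem_keys _ c).mp) hq) (by simp [hk])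
    | some v => rw [PySem.Dict.getD_of_get?_eq_some _ ([] : List Int) hq]
  rw [bPositions_getD] at hg
  exact PySem.Dict.mem_items_of_get?_eq_some _ hg

lemma bPositions_items_shape (names : List String) (pr : String × List Int)
    (h : pr ∈ (bPositions names).items) :
    pr = (pr.1, (idxsNat names pr.1).map (fun (j : Nat) => (j : Int))) := by
  have hnd := bPositions_keys_nodup names
  have hmem : (pr.1, pr.2) ∈ (bPositions names).items := by simpa using h
  have hget := PySem.Dict.get?_of_mem_items _ hmem hnd
  have h2 := PySem.Dict.getD_of_get?_eq_some _ ([] : List Int) hget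
  rw [bPositions_getD] at h2
  exact Prod.ext rfl h2.symm

-- ---- generic fold invariants ----

lemma foldl_pres {α β : Type} (st : β → α → β) (P : β → Prop) (L : List α)
    (h : ∀ q ∈ L, ∀ o, P o → P (st o q)) (o : β) (ho : P o) : P (L.foldl st o) := by
  induction L generalizing o with
  | nil => exact ho
  | cons x L ih =>
    exact ih (fun q hq => h q (List.mem_cons_of_mem _ hq)) _ (h x List.mem_cons_self o ho)

lemma foldl_estab {α β : Type} (st : β → α → β) (P Inv : β → Prop) (L : List α) (x : α)
    (hx : x ∈ L)
    (hInv : ∀ q ∈ L, ∀ o, Inv o → Inv (st o q))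
    (hset : ∀ o, Inv o → P (st o x))
    (hP : ∀ q ∈ L, ∀ o, P o → P (st o q))
    (o : β) (ho : Inv o) : P (L.foldl st o) := by
  induction L generalizing o with
  | nil => cases hx
  | cons y L ih =>
    rcases List.mem_cons.mp hx with rfl | hx'
    · exact foldl_pres st P L (fun q hq => hP q (List.mem_cons_of_mem _ hq)) _ (hset o ho)
    · exact ih hx' (fun q hq => hInv q (List.mem_cons_of_mem _ hq))
        (fun q hq => hP q (List.mem_cons_of_mem _ hq)) _ (hInv y List.mem_cons_self o ho)

-- ---- the scatter phase ----

def bStep (o : List (Option String)) (pr : String × List Int) :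
    List (Option String) :=
  (PySem.List.enumerate pr.2 1).foldl
    (fun o q => PySem.List.pySetD o q.2
        (some (if q.1 == 1 then pr.1 else pr.1 ++ "_" ++ PySem.Int.toStr q.1))) o

lemma bWrite_eq (names : List String) (c : String) (k j : Nat)
    (h : (idxsNat names c)[k]? = some j) (o : List (Option String)) :
    PySem.List.pySetD o ((j : Nat) : Int)
        (some (if (1 + (k : Int)) == 1 then c else c ++ "_" ++ PySem.Int.toStr (1 + (k : Int))))
      = o.set j (some (expOut names j)) := by
  obtain ⟨h1, h2, h3⟩ := idxsNat_core names c k j h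
  rw [PySem.List.pySetD_natCast]
  congr 1
  unfold expOut
  rw [h2, h3]
  cases k with
  | zero => simp
  | succ k =>
    have c1 : ((1 + ((k+1 : Nat) : Int)) == 1) = false := by simpa using (by push_cast; omega : ¬ (1 + ((k+1:Nat):Int)) = 1)
    have c2 : ((k + 1 + 1 : Nat) == 1) = false := by simp
    rw [c1, c2]
    simp only [Bool.false_eq_true, if_false]
    have : (1 + ((k+1 : Nat) : Int)) = ((k + 1 + 1 : Nat) : Int) := by push_cast; ring
    rw [this]

-- q ∈ enumerate idxs 1 with idxs = map cast (idxsNat names c) determines a (k, j) pair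
lemma mem_enum_char (names : List String) (c : String) (q : Int × Int)
    (hq : q ∈ PySem.List.enumerate ((idxsNat names c).map (fun (j : Nat) => (j : Int))) 1) :
    ∃ k j : Nat, (idxsNat names c)[k]? = some j ∧ q = (1 + (k : Int), (j : Int)) := by
  obtain ⟨k, hk⟩ := List.mem_iff_getElem?.mp hq
  rw [PySem.List.getElem?_enumerate, List.getElem?_map] at hk
  cases hj : (idxsNat names c)[k]? with
  | none => rw [hj] at hk; simp at hk
  | some j =>
    rw [hj] at hk
    simp at hk
    exact ⟨k, j, hj, hk.symm⟩

def Vinv (names : List String) (o : List (Option String)) : Prop :=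
  o.length = names.length ∧ ∀ j (h : j < o.length), o[j] = none ∨ o[j] = some (expOut names j)

def Dinv (j : Nat) (o : List (Option String)) : Prop := o.getD j none ≠ none

lemma Vinv_set (names : List String) (o : List (Option String)) (j : Nat)
    (ho : Vinv names o) : Vinv names (o.set j (some (expOut names j))) := by
  obtain ⟨hl, hv⟩ := ho
  refine ⟨by simp [hl], ?_⟩
  intro j' hj'
  rw [List.length_set] at hj'
  rw [List.getElem_set]
  by_cases hjj : j = j'
  · subst hjj; simp
  · rw [if_neg hjj]; exact hv j' hj'

lemma Dinv_set (o : List (Option String)) (i j : Nat) (v : String)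
    (ho : Dinv j o) : Dinv j (o.set i (some v)) := by
  unfold Dinv at *
  rw [List.getD_eq_getElem?_getD, List.getElem?_set] at *
  by_cases hij : i = j
  · subst hij
    by_cases hlt : i < o.length
    · simp [hlt]
    · simpa [hlt] using ho
  · simpa [hij] using ho

lemma bStep_V (names : List String) (pr : String × List Int)
    (hpr : pr = (pr.1, (idxsNat names pr.1).map (fun (j : Nat) => (j : Int))))
    (o : List (Option String)) (ho : Vinv names o) : Vinv names (bStep o pr) := by
  unfold bStep
  apply foldl_pres _ (Vinv names)
  · intro q hq o' ho'
    rw [hpr] at hq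
    obtain ⟨k, j, hkj, rfl⟩ := mem_enum_char names pr.1 q hq
    rw [bWrite_eq names pr.1 k j hkj]
    exact Vinv_set names o' j ho'
  · exact ho

lemma bStep_len (names : List String) (pr : String × List Int)
    (o : List (Option String)) (ho : o.length = names.length) :
    (bStep o pr).length = names.length := by
  unfold bStep
  refine foldl_pres _ (fun (l : List (Option String)) => l.length = names.length) _ ?_ o ho
  intro q _ o' ho'
  rw [PySem.List.length_pySetD]; exact ho'

lemma bStep_D (names : List String) (pr : String × List Int)
    (hpr : pr = (pr.1, (idxsNat names pr.1).map (fun (j : Nat) => (j : Int))))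
    (j : Nat) (o : List (Option String)) (ho : Dinv j o) : Dinv j (bStep o pr) := by
  unfold bStep
  apply foldl_pres _ (Dinv j)
  · intro q hq o' ho'
    rw [hpr] at hq
    obtain ⟨k, j', hkj, rfl⟩ := mem_enum_char names pr.1 q hq
    rw [bWrite_eq names pr.1 k j' hkj]
    exact Dinv_set o' j' j _ ho'
  · exact ho

lemma bStep_estab (names : List String) (c : String) (j k : Nat)
    (hkj : (idxsNat names c)[k]? = some j)
    (o : List (Option String)) (ho : o.length = names.length) :
    Dinv j (bStep o (c, (idxsNat names c).map (fun (i : Nat) => (i : Int)))) := by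
  unfold bStep
  have hj : j < names.length := (idxsNat_core names c k j hkj).1
  have hq0 : ((1 + (k : Int), (j : Int)) : Int × Int)
      ∈ PySem.List.enumerate ((idxsNat names c).map (fun (i : Nat) => (i : Int))) 1 := by
    apply List.mem_of_getElem? (i := k)
    rw [PySem.List.getElem?_enumerate, List.getElem?_map, hkj]
    rfl
  apply foldl_estab _ (Dinv j) (fun o => o.length = names.length) _ _ hq0
  · intro q _ o' ho'
    rw [PySem.List.length_pySetD]; exact ho'
  · intro o' ho'
    simp only
    rw [bWrite_eq names c k j hkj]
    unfold Dinv
    rw [List.getD_eq_getElem?_getD, List.getElem?_set]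
    simp [ho' ▸ hj]
  · intro q hq o' ho'
    obtain ⟨k', j', hkj', rfl⟩ := mem_enum_char names c q hq
    rw [bWrite_eq names c k' j' hkj']
    exact Dinv_set o' j' j _ ho'
  · exact ho

lemma scatter_V (names : List String) (items : List (String × List Int))
    (hitems : ∀ pr ∈ items, pr = (pr.1, (idxsNat names pr.1).map (fun (j : Nat) => (j : Int))))
    (o : List (Option String)) (ho : Vinv names o) :
    Vinv names (items.foldl bStep o) := by
  apply foldl_pres _ (Vinv names)
  · intro pr hpr o' ho'
    exact bStep_V names pr (hitems pr hpr) o' ho'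
  · exact ho

lemma scatter_D (names : List String) (items : List (String × List Int))
    (hitems : ∀ pr ∈ items, pr = (pr.1, (idxsNat names pr.1).map (fun (j : Nat) => (j : Int))))
    (j : Nat) (hj : j < names.length)
    (hmem : ((names.getD j "", (idxsNat names (names.getD j "")).map (fun (i : Nat) => (i : Int))) : String × List Int) ∈ items)
    (o : List (Option String)) (ho : o.length = names.length) :
    Dinv j (items.foldl bStep o) := by
  have hjm : j ∈ idxsNat names (names.getD j "") := mem_idxsNat_self names j hj
  obtain ⟨k, hk⟩ := List.mem_iff_getElem?.mp hjm
  apply foldl_estab _ (Dinv j) (fun o => o.length = names.length) _ _ hmem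
  · intro pr _ o' ho'
    exact bStep_len names pr o' ho'
  · intro o' ho'
    exact bStep_estab names (names.getD j "") j k hk o' ho'
  · intro pr hpr o' ho'
    exact bStep_D names pr (hitems pr hpr) j o' ho'
  · exact ho

lemma fieldChecker_alt_eq_map (names : List String) :
    fieldChecker_alt names = (List.range names.length).map (expOut names) := by
  show ((bPositions names).items.foldl bStep
      (List.replicate names.length (none : Option String))).map (fun o => o.getD "")
    = (List.range names.length).map (expOut names)
  have hitems : ∀ pr ∈ (bPositions names).items,
      pr = (pr.1, (idxsNat names pr.1).map (fun (j : Nat) => (j : Int))) :=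
    fun pr h => bPositions_items_shape names pr h
  have hV : Vinv names ((bPositions names).items.foldl bStep
      (List.replicate names.length (none : Option String))) := by
    apply scatter_V names _ hitems
    refine ⟨by simp, ?_⟩
    intro j hj
    left
    simp
  have hD : ∀ j, j < names.length → Dinv j ((bPositions names).items.foldl bStep
      (List.replicate names.length (none : Option String))) := by
    intro j hj
    apply scatter_D names _ hitems j hj
    · exact bPositions_mem_items names (names.getD j "")
        (by rw [List.getD_eq_getElem?_getD, List.getElem?_eq_getElem hj]
            exact List.getElem_mem hj)
    · simp
  set out := (bPositions names).items.foldl bStep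
      (List.replicate names.length (none : Option String)) with hout
  have hlen : out.length = names.length := hV.1
  have hval : ∀ j (h : j < out.length), out[j] = some (expOut names j) := by
    intro j hj
    rcases hV.2 j hj with hnone | hv
    · exfalso
      apply hD j (hlen ▸ hj)
      rw [List.getD_eq_getElem?_getD, List.getElem?_eq_getElem hj, hnone]
      simp
    · exact hv
  apply List.ext_getElem
  · simp [hlen]
  · intro j h1 h2
    rw [List.getElem_map, List.getElem_map, hval j (by simpa using h1), Option.getD_some,
      List.getElem_range]

-- ===== VERDICT (by name: the statement is the Claim_ definition above) =====
theorem fieldChecker_spec : Claim_equal_fieldChecker := by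
  intro names _
  unfold Spec_fieldChecker
  rw [fieldChecker_eq_map, fieldChecker_alt_eq_map]
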